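-- pv_equiv track=rewrite | github.com/eellak/glossAPI | text_extraction_cleaning/New_parargraph_cleaning_tools.py | remove_ending_chunk
-- ===== SOURCE A (Python) =====
-- def remove_ending_chunk(paragraphs) :
--     paragraphs = paragraphs[::-1]
--     for i,paragraph in enumerate(paragraphs) :
--         if paragraph.startswith('##') :
--             paragraphs[i] = '[Out:Paragraph is in ending chunk]' + paragraphs[i]
--             return paragraphs[::-1]
--         paragraphs[i] = '[Out:Paragraph is in ending chunk]' + paragraphs[i]
--         #del paragraphs[-1]
--     return paragraphs[::-1]
-- ===== SOURCE B (Python) =====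
-- def remove_ending_chunk(paragraphs):
--     result = list(paragraphs)
--     n = len(result)
--     boundary = 0
--     for i in range(n - 1, -1, -1):
--         if result[i].startswith('##'):
--             boundary = i
--             break
--     for i in range(boundary, n):
--         result[i] = '[Out:Paragraph is in ending chunk]' + result[i]
--     return result
-- ===== Notes on version B (the rewrite author's own statement) =====
-- stated objective: simpler
-- what changed: Replaces A's reverse/mutate/re-reverse loop with two plain passes over the unreversed list: a backward scan that finds the boundary index of the last '##' heading (default 0), then a forward pass prefixing the marker onto the suffix from that boundary.
import Mathlib
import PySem

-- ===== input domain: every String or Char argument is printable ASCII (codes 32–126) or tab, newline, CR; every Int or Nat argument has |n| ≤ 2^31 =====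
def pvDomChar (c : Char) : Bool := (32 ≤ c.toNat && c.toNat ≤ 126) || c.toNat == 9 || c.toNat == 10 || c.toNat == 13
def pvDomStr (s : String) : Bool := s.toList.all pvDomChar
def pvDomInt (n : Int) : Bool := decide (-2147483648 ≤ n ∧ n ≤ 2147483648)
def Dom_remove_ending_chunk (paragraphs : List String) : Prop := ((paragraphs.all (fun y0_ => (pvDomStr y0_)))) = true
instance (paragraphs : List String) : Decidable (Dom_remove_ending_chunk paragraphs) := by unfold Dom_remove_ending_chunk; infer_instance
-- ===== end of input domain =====

-- B replaces A's reverse/mutate/re-reverse loop with two plain passes on the unreversed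
-- list (backward boundary search, then forward suffix marking); objective: simpler.

-- ===== PORT A =====
-- A's loop over the reversed list: mark each paragraph; stop (keeping the rest) after a '##' one.
def pvMarkA : List String → List String
  | [] => []
  | p :: rest =>
    if PySem.Str.startswith p "##" then
      ("[Out:Paragraph is in ending chunk]" ++ p) :: rest
    else
      ("[Out:Paragraph is in ending chunk]" ++ p) :: pvMarkA rest

def remove_ending_chunk (paragraphs : List String) : List String :=
  (pvMarkA paragraphs.reverse).reverse

-- ===== PORT B =====
-- backward scan `for i in range(n-1,-1,-1)` with break: largest index whose paragraph
-- starts with '##', default 0 (argument is the number of indices still to try, top first)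
def pvLastHash (ps : List String) : Nat → Nat
  | 0 => 0
  | k + 1 => if PySem.Str.startswith (ps.getD k "") "##" then k else pvLastHash ps k

-- forward pass `for i in range(boundary, n): result[i] = marker + result[i]`
def pvMarkFrom (b : Nat) : Nat → List String → List String
  | _, [] => []
  | i, p :: rest =>
    (if b ≤ i then "[Out:Paragraph is in ending chunk]" ++ p else p) :: pvMarkFrom b (i + 1) rest

def remove_ending_chunk_alt (paragraphs : List String) : List String :=
  pvMarkFrom (pvLastHash paragraphs paragraphs.length) 0 paragraphs

-- ===== PRECONDITION & SPEC =====
def Spec_remove_ending_chunk (paragraphs : List String) (out : List String) : Prop := out = remove_ending_chunk_alt paragraphs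
instance (paragraphs : List String) (out : List String) : Decidable (Spec_remove_ending_chunk paragraphs out) := by unfold Spec_remove_ending_chunk; infer_instance

-- ===== CLAIM (what is proved, stated in full; the proofs are below) =====
def Claim_equal_remove_ending_chunk : Prop := ∀ (paragraphs : List String), Dom_remove_ending_chunk paragraphs → Spec_remove_ending_chunk paragraphs (remove_ending_chunk paragraphs)

-- ===== LEMMAS AND PROOFS =====

theorem pvLastHash_le (ps : List String) (k : Nat) : pvLastHash ps k ≤ k := by
  induction k with
  | zero => simp [pvLastHash]
  | succ k ih =>
    simp only [pvLastHash]
    split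
    · exact Nat.le_succ k
    · exact Nat.le_trans ih (Nat.le_succ k)

theorem pvLastHash_append (xs : List String) (p : String) (k : Nat) (hk : k ≤ xs.length) :
    pvLastHash (xs ++ [p]) k = pvLastHash xs k := by
  induction k with
  | zero => rfl
  | succ k ih =>
    have hlt : k < xs.length := hk
    simp only [pvLastHash, ih (Nat.le_of_lt hlt)]
    have : (xs ++ [p]).getD k "" = xs.getD k "" := by
      simp [List.getD, List.getElem?_append_left hlt]
    rw [this]

theorem pvLastHash_last (xs : List String) (p : String) :
    pvLastHash (xs ++ [p]) (xs.length + 1) =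
      if PySem.Str.startswith p "##" then xs.length else pvLastHash xs xs.length := by
  simp only [pvLastHash, pvLastHash_append xs p xs.length (Nat.le_refl _)]
  have : (xs ++ [p]).getD xs.length "" = p := by
    simp [List.getD]
  rw [this]

theorem pvMarkFrom_append (b i : Nat) (xs : List String) (p : String) :
    pvMarkFrom b i (xs ++ [p]) =
      pvMarkFrom b i xs ++
        [if b ≤ i + xs.length then "[Out:Paragraph is in ending chunk]" ++ p else p] := by
  induction xs generalizing i with
  | nil => simp [pvMarkFrom]
  | cons q qs ih =>
    simp only [List.cons_append, pvMarkFrom, ih (i + 1), List.length_cons]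
    have h3 : i + 1 + qs.length = i + (qs.length + 1) := by omega
    rw [h3]
    rfl


theorem pvMarkFrom_id (b i : Nat) (xs : List String) (h : i + xs.length ≤ b) :
    pvMarkFrom b i xs = xs := by
  induction xs generalizing i with
  | nil => rfl
  | cons q qs ih =>
    simp only [pvMarkFrom]
    have h1 : ¬ b ≤ i := by simp [List.length_cons] at h; omega
    have h2 : i + 1 + qs.length ≤ b := by simp [List.length_cons] at h; omega
    simp [h1, ih (i + 1) h2]

theorem pv_key (rs : List String) :
    (pvMarkA rs).reverse = remove_ending_chunk_alt rs.reverse := by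
  induction rs with
  | nil => rfl
  | cons p rs' ih =>
    have hlen : (rs'.reverse ++ [p]).length = rs'.reverse.length + 1 := by simp
    simp only [remove_ending_chunk_alt] at ih ⊢
    rw [List.reverse_cons, hlen, pvLastHash_last]
    by_cases hp : PySem.Str.startswith p "##"
    · have h1 : pvMarkA (p :: rs') = ("[Out:Paragraph is in ending chunk]" ++ p) :: rs' := by
        simp only [pvMarkA]; rw [if_pos hp]
      rw [h1, List.reverse_cons, if_pos hp, pvMarkFrom_append,
          pvMarkFrom_id rs'.reverse.length 0 rs'.reverse (by omega), if_pos (by omega)]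
    · have h1 : pvMarkA (p :: rs') =
          ("[Out:Paragraph is in ending chunk]" ++ p) :: pvMarkA rs' := by
        simp only [pvMarkA]; rw [if_neg hp]
      have hb : pvLastHash rs'.reverse rs'.reverse.length ≤ 0 + rs'.reverse.length := by
        simpa using pvLastHash_le rs'.reverse rs'.reverse.length
      rw [h1, List.reverse_cons, if_neg hp, pvMarkFrom_append, if_pos hb, ih]

-- ===== VERDICT (by name: the statement is the Claim_ definition above) =====
theorem remove_ending_chunk_spec : Claim_equal_remove_ending_chunk := by
  intro ps _
  show remove_ending_chunk ps = remove_ending_chunk_alt ps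
  have := pv_key ps.reverse
  simpa [remove_ending_chunk] using this
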